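-- pv_equiv track=rewrite | github.com/piero0/AdventOfCode | 11/part_one.py | parse_galaxy
-- ===== SOURCE A (Python) =====
-- def parse_galaxy(data):
--     cols = [True] * (len(data[0])-1)
--     rows = []
--     y = 0
--     glx = []
--     for row in data:
--         rows.append(True)
--         for x,c in enumerate(row.strip()):
--             if c != '.':
--                 cols[x] = False
--                 rows[y] = False
--                 glx.append([x, y])
--         y+=1
--     return glx, rows, cols
-- ===== SOURCE B (Python) =====
-- def parse_galaxy(data):
--     n = len(data[0]) - 1
--     def go(rest, y):
--         if not rest:
--             return [], [], [True] * n
--         glx, rows, cols = go(rest[1:], y + 1)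
--         hits = [x for x, c in enumerate(rest[0].strip()) if c != '.']
--         mask = [True] * n
--         for x in hits:
--             mask[x] = False
--         return ([[x, y] for x in hits] + glx,
--                 [not hits] + rows,
--                 [a and b for a, b in zip(mask, cols)])
--     return go(data, 0)
-- ===== Notes on version B (the rewrite author's own statement) =====
-- stated objective: alternative
-- what changed: A's single fused forward scan that mutates shared pre-filled boolean rows/cols arrays in place is replaced by a recursion over the rows that builds glx and rows back-to-front from each row's hit list and combines cols as an elementwise AND of independent per-row column masks.
import Mathlib
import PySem

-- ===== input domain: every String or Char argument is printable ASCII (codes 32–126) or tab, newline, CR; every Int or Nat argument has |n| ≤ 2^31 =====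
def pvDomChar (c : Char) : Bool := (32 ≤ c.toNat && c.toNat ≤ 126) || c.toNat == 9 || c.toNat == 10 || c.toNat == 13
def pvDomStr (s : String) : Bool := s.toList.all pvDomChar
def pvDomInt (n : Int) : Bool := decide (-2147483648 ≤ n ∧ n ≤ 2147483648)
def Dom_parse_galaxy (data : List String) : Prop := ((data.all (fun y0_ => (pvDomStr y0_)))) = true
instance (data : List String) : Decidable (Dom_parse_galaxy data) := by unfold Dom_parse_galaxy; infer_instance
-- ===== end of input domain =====

-- B replaces A's fused in-place-mutating scan by a recursion over the rows, building glx/rows back-to-front and cols as a columnwise AND-reduction of per-row emptiness masks; equivalence is proved on Pre_ (inputs where A does not raise).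

-- ===== PORT A =====
def pvAInner (y : Int) (st : List (List Int) × List Bool × List Bool) (xc : Int × Char) :
    List (List Int) × List Bool × List Bool :=
  if xc.2 != '.' then
    (st.1 ++ [[xc.1, y]], PySem.List.pySetD st.2.1 y false, PySem.List.pySetD st.2.2 xc.1 false)
  else st

def pvAStep (st : List (List Int) × List Bool × List Bool × Int) (row : String) :
    List (List Int) × List Bool × List Bool × Int :=
  let rows1 := st.2.1 ++ [true]
  let inner := (PySem.List.enumerate (PySem.Str.strip row).toList 0).foldl (pvAInner st.2.2.2)
    (st.1, rows1, st.2.2.1)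
  (inner.1, inner.2.1, inner.2.2, st.2.2.2 + 1)

def parse_galaxy (data : List String) : List (List Int) × List Bool × List Bool :=
  let cols0 : List Bool := List.replicate ((PySem.List.pyGetD data 0 "").toList.length - 1) true
  let r := data.foldl pvAStep ([], [], cols0, 0)
  (r.1, r.2.1, r.2.2.1)

-- ===== PORT B =====
-- [x for x, c in enumerate(rest[0].strip()) if c != '.']
def pvHits (r : String) : List Int :=
  ((PySem.List.enumerate (PySem.Str.strip r).toList 0).filter (fun xc => xc.2 != '.')).map
    (fun xc => xc.1)

def pvBGo (n : Nat) : List String → Int → List (List Int) × List Bool × List Bool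
  | [], _ => ([], [], List.replicate n true)
  | r :: rest, y =>
    let t := pvBGo n rest (y + 1)
    let hits := pvHits r
    let mask := hits.foldl (fun m x => PySem.List.pySetD m x false) (List.replicate n true)
    (hits.map (fun x => [x, y]) ++ t.1, hits.isEmpty :: t.2.1,
      List.zipWith (fun a b => a && b) mask t.2.2)

def parse_galaxy_alt (data : List String) : List (List Int) × List Bool × List Bool :=
  pvBGo ((PySem.List.pyGetD data 0 "").toList.length - 1) data 0

-- ===== PRECONDITION & SPEC =====
-- Pre_ excludes exactly the inputs where A raises IndexError: empty data (len(data[0])),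
-- and any stripped row with a non-'.' character at an index ≥ len(data[0])-1 (cols[x] = False).
def Pre_parse_galaxy (data : List String) : Prop :=
  data ≠ [] ∧ ∀ row ∈ data,
    (((PySem.Str.strip row).toList.drop ((data.headD "").toList.length - 1)).all
      (fun c => c == '.')) = true
instance (data : List String) : Decidable (Pre_parse_galaxy data) := by
  unfold Pre_parse_galaxy; infer_instance

def pvWitness_parse_galaxy : List String := ["#.", ".."]

def Spec_parse_galaxy (data : List String) (out : List (List Int) × List Bool × List Bool) : Prop :=
  out = parse_galaxy_alt data
instance (data : List String) (out : List (List Int) × List Bool × List Bool) :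
    Decidable (Spec_parse_galaxy data out) := by unfold Spec_parse_galaxy; infer_instance

-- ===== CLAIM (what is proved, stated in full; the proofs are below) =====
def Claim_equal_parse_galaxy : Prop := ∀ (data : List String), Dom_parse_galaxy data →
  Pre_parse_galaxy data → Spec_parse_galaxy data (parse_galaxy data)

-- ===== LEMMAS AND PROOFS =====

-- proof-side characterisations of what A accumulates per row
def pvGal (y : Int) (row : List Char) : List (List Int) :=
  ((PySem.List.enumerate row 0).filter (fun xc => xc.2 != '.')).map (fun xc => [xc.1, y])

def pvOccs (row : List Char) : List Int :=
  ((PySem.List.enumerate row 0).filter (fun xc => xc.2 != '.')).map (fun xc => xc.1)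

lemma pv_inner_eq (y : Nat) (chars : List Char) : ∀ (s : Nat) (glx : List (List Int))
    (rows cols : List Bool),
    (PySem.List.enumerate chars (s : Int)).foldl (pvAInner (y : Int)) (glx, rows, cols)
    = (glx ++ ((PySem.List.enumerate chars (s : Int)).filter (fun xc => xc.2 != '.')).map
          (fun xc => [xc.1, (y : Int)]),
       if chars.all (fun c => c == '.') then rows else rows.set y false,
       (((PySem.List.enumerate chars (s : Int)).filter (fun xc => xc.2 != '.')).map
          (fun xc => xc.1)).foldl (fun c x => PySem.List.pySetD c x false) cols) := by
  induction chars with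
  | nil => intro s glx rows cols; simp [PySem.List.enumerate_nil]
  | cons c cs ih =>
    intro s glx rows cols
    rw [PySem.List.enumerate_cons]
    by_cases hc : c = '.'
    · subst hc
      have : ((s : Int) + 1) = ((s + 1 : Nat) : Int) := by push_cast; ring
      simp only [List.foldl_cons, pvAInner, List.filter_cons, List.all_cons]
      simp only [this, ih]
      simp
    · have : ((s : Int) + 1) = ((s + 1 : Nat) : Int) := by push_cast; ring
      simp only [List.foldl_cons, pvAInner, List.filter_cons, List.all_cons]
      have hcb : (c != '.') = true := by simp [hc]
      simp only [hcb, if_pos, this, ih, PySem.List.pySetD_natCast]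
      simp [hc, List.set_set]

lemma pv_set_append_len (l : List Bool) (b c : Bool) : (l ++ [b]).set l.length c = l ++ [c] := by
  induction l with
  | nil => simp
  | cons h t ih => simp [ih]

lemma pv_outer_eq (rowsIn : List String) : ∀ (glx : List (List Int)) (rws cols : List Bool),
    rowsIn.foldl pvAStep (glx, rws, cols, (rws.length : Int))
    = (glx ++ (PySem.List.enumerate (rowsIn.map (fun r => (PySem.Str.strip r).toList))
          (rws.length : Int)).flatMap (fun yr => pvGal yr.1 yr.2),
       rws ++ rowsIn.map (fun r => ((PySem.Str.strip r).toList.all (fun c => c == '.'))),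
       ((rowsIn.map (fun r => (PySem.Str.strip r).toList)).flatMap pvOccs).foldl
          (fun c x => PySem.List.pySetD c x false) cols,
       (rws.length : Int) + rowsIn.length) := by
  induction rowsIn with
  | nil => intro glx rws cols; simp [PySem.List.enumerate_nil]
  | cons r rest ih =>
    intro glx rws cols
    have h0 : (0 : Int) = ((0 : Nat) : Int) := by norm_num
    have hstep : pvAStep (glx, rws, cols, (rws.length : Int)) r
        = (glx ++ pvGal (rws.length : Int) (PySem.Str.strip r).toList,
           rws ++ [(PySem.Str.strip r).toList.all (fun c => c == '.')],
           (pvOccs (PySem.Str.strip r).toList).foldl (fun c x => PySem.List.pySetD c x false) cols,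
           ((rws.length : Int) + 1)) := by
      simp only [pvAStep, h0, pv_inner_eq rws.length, pvGal, pvOccs, pv_set_append_len]
      have hrows : (if ((PySem.Str.strip r).toList.all (fun c => c == '.')) = true
            then rws ++ [true] else rws ++ [false])
          = rws ++ [(PySem.Str.strip r).toList.all (fun c => c == '.')] := by
        by_cases hall : ((PySem.Str.strip r).toList.all (fun c => c == '.')) = true
        · rw [if_pos hall, hall]
        · have hf : ((PySem.Str.strip r).toList.all (fun c => c == '.')) = false := by
            revert hall; cases ((PySem.Str.strip r).toList.all (fun c => c == '.')) <;> simp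
          rw [if_neg hall, hf]
      exact Prod.ext rfl (Prod.ext hrows (Prod.ext rfl rfl))
    simp only [List.foldl_cons, hstep]
    have hlen : ((rws.length : Int) + 1)
        = (((rws ++ [(PySem.Str.strip r).toList.all (fun c => c == '.')]).length : Nat) : Int) := by
      simp
    rw [hlen, ih]
    simp only [List.map_cons, PySem.List.enumerate_cons, List.flatMap_cons, List.foldl_append,
      List.length_append, List.length_cons]
    exact Prod.ext (by simp) (Prod.ext (by simp) (Prod.ext rfl (by simp; ring)))

lemma pv_fold_len (xs : List Int) : ∀ (init : List Bool),
    (xs.foldl (fun c x => PySem.List.pySetD c x false) init).length = init.length := by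
  induction xs with
  | nil => intro init; rfl
  | cons x xs ih => intro init; simp [List.foldl, ih, PySem.List.length_pySetD]

lemma pv_fold_get (xs : List Int) : ∀ (init : List Bool),
    (∀ x ∈ xs, 0 ≤ x ∧ x < (init.length : Int)) → ∀ (j : Nat), (hj : j < init.length) →
    (xs.foldl (fun c x => PySem.List.pySetD c x false) init)[j]?
      = some (init[j] && !(xs.contains (j : Int))) := by
  induction xs with
  | nil => intro init h j hj; simp [List.getElem?_eq_getElem hj]
  | cons x xs ih =>
    intro init h j hj
    have hx := h x (by simp)
    simp only [List.foldl_cons]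
    obtain ⟨k, rfl⟩ := Int.eq_ofNat_of_zero_le hx.1
    rw [PySem.List.pySetD_natCast]
    have hmem : ∀ z ∈ xs, 0 ≤ z ∧ z < (((init.set k false).length : Nat) : Int) := by
      intro z hz
      have := h z (by simp [hz])
      simpa using this
    rw [ih _ hmem j (by simpa using hj)]
    by_cases hkj : k = j
    · simp [List.getElem_set, hkj]
    · have hjk : ¬ j = k := fun h => hkj h.symm
      simp [List.getElem_set, hkj, hjk]

lemma pv_cols_eq (xs : List Int) (n : Nat) (h : ∀ x ∈ xs, 0 ≤ x ∧ x < (n : Int)) :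
    xs.foldl (fun c x => PySem.List.pySetD c x false) (List.replicate n true)
    = (PySem.List.pyRange 0 (n : Int) 1).map (fun x => !(xs.contains x)) := by
  have hlenL : (xs.foldl (fun c x => PySem.List.pySetD c x false) (List.replicate n true)).length
      = n := by rw [pv_fold_len]; simp
  have hlenR : ((PySem.List.pyRange 0 (n : Int) 1).map (fun x => !(xs.contains x))).length
      = n := by simp [PySem.List.length_pyRange_one]
  apply List.ext_getElem?
  intro j
  by_cases hj : j < n
  · rw [pv_fold_get xs _ (by simpa using h) j (by simpa using hj)]
    rw [PySem.List.getElem?_map_pyRange_zero _ _ _ (by exact_mod_cast hj)]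
    simp
  · rw [List.getElem?_eq_none (by omega), List.getElem?_eq_none (by omega)]

lemma pv_hits_gal (y : Int) (r : String) :
    (pvHits r).map (fun x => [x, y]) = pvGal y (PySem.Str.strip r).toList := by
  unfold pvHits pvGal
  rw [List.map_map]
  rfl

lemma pv_occs_empty (chars : List Char) :
    (pvOccs chars).isEmpty = chars.all (fun c => c == '.') := by
  rw [Bool.eq_iff_iff]
  unfold pvOccs
  simp only [List.isEmpty_iff, List.map_eq_nil_iff, List.filter_eq_nil_iff, List.all_eq_true,
    PySem.List.mem_enumerate_iff]
  constructor
  · intro h c hc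
    obtain ⟨k, hk, rfl⟩ := List.getElem_of_mem hc
    have := h ((0 : Int) + k, chars[k]) ⟨k, hk, rfl⟩
    simpa using this
  · rintro h p ⟨k, hk, rfl⟩
    have := h chars[k] (List.getElem_mem hk)
    simp only [beq_iff_eq] at this
    simp [this]

lemma pv_zip_and_map {α : Type} (f g : α → Bool) (l : List α) :
    List.zipWith (fun a b => a && b) (l.map f) (l.map g) = l.map (fun x => f x && g x) := by
  induction l with
  | nil => rfl
  | cons a t ih => simp [ih]

-- characterisation of B's recursion
lemma pv_bgo_eq (n : Nat) (rowsIn : List String)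
    (hb : ∀ r ∈ rowsIn, ∀ x ∈ pvOccs (PySem.Str.strip r).toList, 0 ≤ x ∧ x < (n : Int)) :
    ∀ (y : Int), pvBGo n rowsIn y
    = ((PySem.List.enumerate (rowsIn.map (fun r => (PySem.Str.strip r).toList)) y).flatMap
          (fun yr => pvGal yr.1 yr.2),
       rowsIn.map (fun r => ((PySem.Str.strip r).toList.all (fun c => c == '.'))),
       (PySem.List.pyRange 0 (n : Int) 1).map (fun i =>
         rowsIn.all (fun r => !((pvOccs (PySem.Str.strip r).toList).contains i)))) := by
  revert hb
  induction rowsIn with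
  | nil =>
    intro _ y
    simp only [pvBGo, List.map_nil, PySem.List.enumerate_nil, List.flatMap_nil, List.all_nil]
    refine Prod.ext rfl (Prod.ext rfl ?_)
    simp only [PySem.List.pyRange_one, Int.sub_zero, Int.toNat_natCast]
    rw [List.map_map]
    apply List.ext_getElem (by simp)
    intro j h1 h2
    simp
  | cons r rest ih =>
    intro hb y
    have hbr : ∀ x ∈ pvOccs (PySem.Str.strip r).toList, 0 ≤ x ∧ x < (n : Int) :=
      hb r (by simp)
    have hbrest : ∀ r' ∈ rest, ∀ x ∈ pvOccs (PySem.Str.strip r').toList,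
        0 ≤ x ∧ x < (n : Int) := fun r' hr' => hb r' (by simp [hr'])
    simp only [pvBGo, ih hbrest, List.map_cons, PySem.List.enumerate_cons, List.flatMap_cons,
      List.all_cons]
    rw [pv_hits_gal,
      show (pvHits r).isEmpty = (PySem.Str.strip r).toList.all (fun c => c == '.') from
        pv_occs_empty _,
      show pvHits r = pvOccs (PySem.Str.strip r).toList from rfl,
      pv_cols_eq _ _ hbr, pv_zip_and_map]

-- ===== VERDICT (by name: the statement is the Claim_ definition above) =====
set_option maxHeartbeats 2000000 in
theorem parse_galaxy_spec : Claim_equal_parse_galaxy := by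
  intro data _ hpre
  obtain ⟨hne, hdots⟩ := hpre
  obtain ⟨d0, rest, rfl⟩ : ∃ d0 rest, data = d0 :: rest := by
    cases data with
    | nil => exact absurd rfl hne
    | cons a l => exact ⟨a, l, rfl⟩
  have hm0 : PySem.List.pyGetD (d0 :: rest) 0 "" = d0 := by
    rw [PySem.List.pyGetD_zero]; rfl
  unfold Spec_parse_galaxy
  simp only [parse_galaxy, parse_galaxy_alt, hm0]
  have hout := pv_outer_eq (d0 :: rest) [] [] (List.replicate (d0.toList.length - 1) true)
  simp only [List.length_nil, Nat.cast_zero, List.nil_append] at hout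
  have hoccRow : ∀ r ∈ (d0 :: rest), ∀ x ∈ pvOccs (PySem.Str.strip r).toList,
      0 ≤ x ∧ x < ((d0.toList.length - 1 : Nat) : Int) := by
    intro r hr x hxr
    unfold pvOccs at hxr
    rw [List.mem_map] at hxr
    obtain ⟨xc, hxc, rfl⟩ := hxr
    rw [List.mem_filter] at hxc
    obtain ⟨hmemE, hdot⟩ := hxc
    rw [PySem.List.mem_enumerate_iff] at hmemE
    obtain ⟨k, hk, hxck⟩ := hmemE
    have h1 : xc.1 = (k : Int) := by rw [hxck]; simp
    have h2 : xc.2 = ((PySem.Str.strip r).toList)[k] := by rw [hxck]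
    rw [h1]
    constructor
    · omega
    · have hall := hdots r hr
      simp only [List.headD_cons] at hall
      by_contra hge
      have hk1 : d0.toList.length - 1 ≤ k := by omega
      have hlt : k - (d0.toList.length - 1)
          < ((PySem.Str.strip r).toList.drop (d0.toList.length - 1)).length := by
        simp only [List.length_drop]; omega
      have hEq : ((PySem.Str.strip r).toList.drop (d0.toList.length - 1))[k -
            (d0.toList.length - 1)]'hlt = ((PySem.Str.strip r).toList)[k] := by
        rw [List.getElem_drop]; congr 1; omega
      have hmem2 : ((PySem.Str.strip r).toList)[k]
          ∈ (PySem.Str.strip r).toList.drop (d0.toList.length - 1) := by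
        rw [← hEq]; exact List.getElem_mem _
      have hchar := List.all_eq_true.mp hall _ hmem2
      simp only [beq_iff_eq] at hchar
      rw [h2, hchar] at hdot
      simp at hdot
  have hocc : ∀ x ∈ ((d0 :: rest).map (fun r => (PySem.Str.strip r).toList)).flatMap pvOccs,
      0 ≤ x ∧ x < ((d0.toList.length - 1 : Nat) : Int) := by
    intro x hx
    rw [List.mem_flatMap] at hx
    obtain ⟨row, hrow, hxr⟩ := hx
    rw [List.mem_map] at hrow
    obtain ⟨r, hr, rfl⟩ := hrow
    exact hoccRow r hr x hxr
  rw [hout, pv_bgo_eq _ _ hoccRow]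
  refine Prod.ext rfl (Prod.ext rfl ?_)
  rw [pv_cols_eq _ _ hocc]
  apply List.map_congr_left
  intro x _
  rw [Bool.eq_iff_iff]
  simp only [Bool.not_eq_eq_eq_not, Bool.not_true, List.contains_eq_any_beq]
  constructor
  · intro h
    rw [List.all_eq_true]
    intro r hr
    rw [Bool.not_eq_eq_eq_not, Bool.not_true, ← Bool.not_eq_true, List.any_eq_true]
    rintro ⟨z, hz, hzx⟩
    rw [← Bool.not_eq_true, List.any_eq_true] at h
    exact h ⟨z, List.mem_flatMap.mpr ⟨(PySem.Str.strip r).toList,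
      List.mem_map.mpr ⟨r, hr, rfl⟩, hz⟩, hzx⟩
  · intro h
    rw [List.all_eq_true] at h
    rw [← Bool.not_eq_true, List.any_eq_true]
    rintro ⟨z, hz, hzx⟩
    rw [List.mem_flatMap] at hz
    obtain ⟨chars, hchars, hzc⟩ := hz
    rw [List.mem_map] at hchars
    obtain ⟨r, hr, rfl⟩ := hchars
    have := h r hr
    rw [Bool.not_eq_eq_eq_not, Bool.not_true, ← Bool.not_eq_true, List.any_eq_true] at this
    exact this ⟨z, hzc, hzx⟩
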